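-- pv_equiv track=rewrite | github.com/NishantCM31/Lab-Assignments | Python/Assignment/A4/A3.py | find_long_sequences
-- ===== SOURCE A (Python) =====
-- def find_long_sequences(dna_sequence, threshold):
--     current_seq = ''
--     sequences = []
--     for base in dna_sequence:
--         if current_seq and base == current_seq[-1]:
--             current_seq += base
--         else:
--             if len(current_seq) > threshold:
--                 sequences.append(current_seq)
--             current_seq = base
--     if len(current_seq) > threshold:  # Add the last sequence if it exceeds the threshold
--         sequences.append(current_seq)
--     return sequences
-- ===== SOURCE B (Python) =====
-- def find_long_sequences(dna_sequence, threshold):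
--     # split into maximal runs of equal characters (two-pointer over the remaining suffix),
--     # then keep the runs longer than the threshold
--     runs = []
--     rest = dna_sequence
--     while rest:
--         k = 1
--         while k < len(rest) and rest[k] == rest[0]:
--             k += 1
--         runs.append(rest[:k])
--         rest = rest[k:]
--     return [r for r in runs if len(r) > threshold]
-- ===== Notes on version B (the rewrite author's own statement) =====
-- stated objective: alternative
-- what changed: B splits the string into maximal runs with an iterative two-pointer suffix loop and then filters them by length, instead of A's inline state machine that grows a current_seq and flushes it at each run boundary; B does not reproduce A's leftover-empty-run flush on negative thresholds.
-- intended difference: For threshold < 0, A's flush of the initial empty current_seq prepends a spurious empty string '' to the result (e.g. A('AAB',-1)=['','AA','B']); B returns only the actual runs (['AA','B']), which is the intended list of long runs. — e.g. on find_long_sequences("AAB", -1): A returns ["", "AA", "B"], B returns ["AA", "B"]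
import Mathlib
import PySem

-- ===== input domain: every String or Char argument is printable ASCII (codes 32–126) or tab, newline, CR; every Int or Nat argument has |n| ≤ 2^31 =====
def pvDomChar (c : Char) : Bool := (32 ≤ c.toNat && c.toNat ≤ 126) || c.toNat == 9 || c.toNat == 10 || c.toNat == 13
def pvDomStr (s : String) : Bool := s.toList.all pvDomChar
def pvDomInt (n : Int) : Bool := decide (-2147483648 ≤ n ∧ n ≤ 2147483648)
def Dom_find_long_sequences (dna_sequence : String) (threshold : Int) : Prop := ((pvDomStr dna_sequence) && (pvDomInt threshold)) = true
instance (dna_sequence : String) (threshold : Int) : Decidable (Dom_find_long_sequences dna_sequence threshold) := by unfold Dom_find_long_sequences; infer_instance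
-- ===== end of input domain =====

-- B extracts maximal runs with a two-pointer suffix loop and filters them by length
-- (alternative decomposition, same O(n) cost); B does not reproduce A's spurious leading ''
-- on negative thresholds (see D_ below).

-- ===== PORT A =====
-- `if len(current_seq) > threshold: sequences.append(current_seq)`
def pvFlushA (t : Int) (cur : List Char) (seqs : List String) : List String :=
  if (cur.length : Int) > t then seqs ++ [String.mk cur] else seqs

-- one loop iteration of A; `current_seq and base == current_seq[-1]` is exactly
-- `cur.getLast? = some base` (on empty cur both the Python truthiness test and getLast? reject)
def pvStepA (t : Int) (st : List Char × List String) (base : Char) : List Char × List String :=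
  if st.1.getLast? = some base then (st.1 ++ [base], st.2)
  else ([base], pvFlushA t st.1 st.2)

def find_long_sequences (dna_sequence : String) (threshold : Int) : List String :=
  let st := dna_sequence.toList.foldl (pvStepA threshold) ([], [])
  pvFlushA threshold st.1 st.2

-- ===== PORT B =====
-- the inner `while k < len(rest) and rest[k] == rest[0]` counter of Source B
def pvRunLen (c : Char) : List Char → Nat
  | [] => 0
  | x :: xs => if x == c then 1 + pvRunLen c xs else 0

-- Source B's `while rest:` loop over the remaining suffix: runs.append(rest[:k]); rest = rest[k:]
def pvRuns : List Char → List (List Char)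
  | [] => []
  | c :: rest =>
      (c :: rest.take (pvRunLen c rest)) :: pvRuns (rest.drop (pvRunLen c rest))
  termination_by l => l.length
  decreasing_by
    simp only [List.length_drop, List.length_cons]
    omega

def find_long_sequences_alt (dna_sequence : String) (threshold : Int) : List String :=
  ((pvRuns dna_sequence.toList).filter (fun r => (r.length : Int) > threshold)).map String.mk

-- ===== PRECONDITION & SPEC =====
-- For threshold < 0, A's flush of its initial empty current_seq prepends a spurious empty
-- string '' to the result; B returns only the actual runs, the intended value.
def D_find_long_sequences (_dna_sequence : String) (threshold : Int) : Prop := threshold < 0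
instance (dna_sequence : String) (threshold : Int) : Decidable (D_find_long_sequences dna_sequence threshold) := by unfold D_find_long_sequences; infer_instance

def Spec_find_long_sequences (dna_sequence : String) (threshold : Int) (out : List String) : Prop := ¬ D_find_long_sequences dna_sequence threshold → out = find_long_sequences_alt dna_sequence threshold
instance (dna_sequence : String) (threshold : Int) (out : List String) : Decidable (Spec_find_long_sequences dna_sequence threshold out) := by unfold Spec_find_long_sequences; infer_instance

def pvDiffWitness_find_long_sequences : String × Int := ("AAB", -1)
def pvDiffWitnessOut_find_long_sequences : (List String) × (List String) := (["", "AA", "B"], ["AA", "B"])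

-- ===== CLAIM (what is proved, stated in full; the proofs are below) =====
def Claim_unchanged_find_long_sequences : Prop := ∀ (dna_sequence : String) (threshold : Int), Dom_find_long_sequences dna_sequence threshold → Spec_find_long_sequences dna_sequence threshold (find_long_sequences dna_sequence threshold)
def Claim_changed_find_long_sequences : Prop := Dom_find_long_sequences (pvDiffWitness_find_long_sequences.1) (pvDiffWitness_find_long_sequences.2) ∧ D_find_long_sequences (pvDiffWitness_find_long_sequences.1) (pvDiffWitness_find_long_sequences.2) ∧ find_long_sequences (pvDiffWitness_find_long_sequences.1) (pvDiffWitness_find_long_sequences.2) = pvDiffWitnessOut_find_long_sequences.1 ∧ find_long_sequences_alt (pvDiffWitness_find_long_sequences.1) (pvDiffWitness_find_long_sequences.2) = pvDiffWitnessOut_find_long_sequences.2 ∧ pvDiffWitnessOut_find_long_sequences.1 ≠ pvDiffWitnessOut_find_long_sequences.2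
def Claim_exact_find_long_sequences : Prop := ∀ (dna_sequence : String) (threshold : Int), Dom_find_long_sequences dna_sequence threshold → D_find_long_sequences dna_sequence threshold → find_long_sequences dna_sequence threshold ≠ find_long_sequences_alt dna_sequence threshold

-- ===== LEMMAS AND PROOFS =====

-- the filtered-and-rendered runs, the shape B produces
def pvFlt (t : Int) (rs : List (List Char)) : List String :=
  (rs.filter (fun r => (r.length : Int) > t)).map String.mk

theorem pvFlushA_eq (t : Int) (cur : List Char) (seqs : List String) :
    pvFlushA t cur seqs = seqs ++ pvFlt t [cur] := by
  unfold pvFlushA pvFlt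
  split <;> simp_all

theorem pvFlt_nil (t : Int) : pvFlt t [] = [] := rfl

theorem pvFlt_cons (t : Int) (r : List Char) (rs : List (List Char)) :
    pvFlt t (r :: rs) = pvFlt t [r] ++ pvFlt t rs := by
  unfold pvFlt
  by_cases h : (r.length : Int) > t <;> simp [h]

theorem getLast?_cons_replicate (b : Char) (k : Nat) :
    (b :: List.replicate k b).getLast? = some b := by
  induction k with
  | zero => rfl
  | succ n ih => simpa [List.replicate_succ, List.getLast?_cons_cons] using ih

theorem take_runLen (c : Char) (rest : List Char) :
    rest.take (pvRunLen c rest) = List.replicate (pvRunLen c rest) c := by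
  induction rest with
  | nil => rfl
  | cons x xs ih =>
    unfold pvRunLen
    by_cases h : x = c
    · simp [h, List.replicate_succ, Nat.add_comm, ih]
    · simp [h]

theorem drop_runLen_head (c : Char) (rest : List Char) :
    ∀ x xs, rest.drop (pvRunLen c rest) = x :: xs → x ≠ c := by
  induction rest with
  | nil => intro x xs h; simp at h
  | cons y ys ih =>
    intro x xs h
    unfold pvRunLen at h
    by_cases hy : y = c
    · simp [hy, Nat.add_comm] at h
      exact ih x xs h
    · simp [hy] at h
      rw [← h.1]; exact hy

-- absorbing a block of k copies of the current run's character
theorem foldl_absorb (t : Int) (c : Char) :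
    ∀ (k : Nat) (cur : List Char) (seqs : List String) (rest : List Char),
      cur.getLast? = some c →
      List.foldl (pvStepA t) (cur, seqs) (List.replicate k c ++ rest)
        = List.foldl (pvStepA t) (cur ++ List.replicate k c, seqs) rest := by
  intro k
  induction k with
  | zero => intro cur seqs rest _; simp
  | succ n ih =>
    intro cur seqs rest hlast
    rw [List.replicate_succ]
    simp only [List.cons_append, List.foldl_cons]
    rw [show pvStepA t (cur, seqs) c = (cur ++ [c], seqs) by simp [pvStepA, hlast]]
    rw [ih (cur ++ [c]) seqs rest (by simp)]
    simp

-- main invariant: from a boundary state (cur the whole previous run, l starting with a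
-- different character), the rest of A's loop produces exactly B's filtered runs of l
theorem foldl_runs (t : Int) :
    ∀ (l : List Char), ∀ (cur : List Char) (seqs : List String) (c0 : Char),
      cur.getLast? = some c0 →
      (∀ x xs, l = x :: xs → x ≠ c0) →
      pvFlushA t (List.foldl (pvStepA t) (cur, seqs) l).1
          (List.foldl (pvStepA t) (cur, seqs) l).2
        = seqs ++ pvFlt t [cur] ++ pvFlt t (pvRuns l) := by
  intro l
  induction l using pvRuns.induct with
  | case1 =>
    intro cur seqs c0 _ _
    simp [pvRuns, pvFlushA_eq, pvFlt_nil]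
  | case2 c rest ih =>
    intro cur seqs c0 hlast hhead
    have hne : c ≠ c0 := hhead c rest rfl
    have hstep : pvStepA t (cur, seqs) c = ([c], pvFlushA t cur seqs) := by
      simp [pvStepA, hlast, Ne.symm hne]

    rw [List.foldl_cons, hstep]
    conv_lhs => rw [← List.take_append_drop (pvRunLen c rest) rest, take_runLen]
    rw [foldl_absorb t c (pvRunLen c rest) [c] (pvFlushA t cur seqs)
        (rest.drop (pvRunLen c rest)) rfl]
    rw [List.singleton_append]
    rw [ih (c :: List.replicate (pvRunLen c rest) c) (pvFlushA t cur seqs) c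
        (getLast?_cons_replicate c _) (drop_runLen_head c rest)]
    rw [show pvRuns (c :: rest)
          = (c :: rest.take (pvRunLen c rest)) :: pvRuns (rest.drop (pvRunLen c rest)) from by
        simp only [pvRuns]]
    rw [take_runLen, pvFlt_cons, pvFlushA_eq]
    simp only [pvFlt_nil, List.append_nil, List.append_assoc]
    rw [← pvFlt_cons]

theorem master (s : String) (t : Int) :
    find_long_sequences s t
      = (if (0 : Int) > t then [""] else []) ++ find_long_sequences_alt s t := by
  unfold find_long_sequences find_long_sequences_alt
  have hflt : ∀ rs, (List.map String.mk (List.filter (fun r => (r.length : Int) > t) rs))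
      = pvFlt t rs := fun rs => rfl
  have h0 : pvFlushA t [] [] = (if (0 : Int) > t then [""] else []) := by
    unfold pvFlushA
    split <;> simp_all <;> rfl
  cases s.toList with
  | nil =>
    simp only [List.foldl_nil, hflt, pvRuns, pvFlt_nil]
    simpa using h0
  | cons b rest =>
    have hstep : pvStepA t (([] : List Char), ([] : List String)) b
        = ([b], pvFlushA t [] []) := by
      simp [pvStepA]
    rw [List.foldl_cons, hstep]
    conv_lhs => rw [← List.take_append_drop (pvRunLen b rest) rest, take_runLen]
    rw [foldl_absorb t b (pvRunLen b rest) [b] (pvFlushA t [] [])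
        (rest.drop (pvRunLen b rest)) rfl]
    rw [List.singleton_append]
    rw [foldl_runs t (rest.drop (pvRunLen b rest)) (b :: List.replicate (pvRunLen b rest) b)
        (pvFlushA t [] []) b (getLast?_cons_replicate b _) (drop_runLen_head b rest)]
    rw [show pvRuns (b :: rest)
          = (b :: rest.take (pvRunLen b rest)) :: pvRuns (rest.drop (pvRunLen b rest)) from by
        simp only [pvRuns]]
    rw [take_runLen, hflt, h0, List.append_assoc]
    congr 1
    exact (pvFlt_cons t _ _).symm

-- ===== VERDICT (by name: the statement is the Claim_ definition above) =====
theorem find_long_sequences_spec : Claim_unchanged_find_long_sequences := by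
  intro s t _ hD
  unfold D_find_long_sequences at hD
  rw [master]
  have h0 : ¬ ((0 : Int) > t) := by omega
  simp [h0]

theorem find_long_sequences_changed : Claim_changed_find_long_sequences := by
  unfold Claim_changed_find_long_sequences
  refine ⟨by decide, by decide, by decide, ?_, by decide⟩
  show find_long_sequences_alt "AAB" (-1) = ["AA", "B"]
  unfold find_long_sequences_alt
  rw [show ("AAB" : String).toList = ['A', 'A', 'B'] from rfl]
  have h1 : pvRuns ['A', 'A', 'B'] = [['A', 'A'], ['B']] := by
    rw [show pvRuns ['A', 'A', 'B']
          = ('A' :: (['A', 'B'] : List Char).take (pvRunLen 'A' ['A', 'B']))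
            :: pvRuns ((['A', 'B'] : List Char).drop (pvRunLen 'A' ['A', 'B'])) from by
        simp only [pvRuns]]
    rw [show pvRunLen 'A' ['A', 'B'] = 1 from by simp [pvRunLen]]
    rw [show (['A', 'B'] : List Char).drop 1 = ['B'] from rfl]
    rw [show pvRuns ['B']
          = ('B' :: ([] : List Char).take (pvRunLen 'B' []))
            :: pvRuns (([] : List Char).drop (pvRunLen 'B' [])) from by
        simp only [pvRuns]]
    rw [show (List.drop (pvRunLen 'B' []) ([] : List Char)) = [] from rfl]
    rw [show pvRuns ([] : List Char) = [] from by simp only [pvRuns]]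
    decide
  rw [h1]
  decide

theorem find_long_sequences_tight : Claim_exact_find_long_sequences := by
  intro s t _ hD h
  unfold D_find_long_sequences at hD
  rw [master] at h
  have hlen := congrArg List.length h
  have h0 : (0 : Int) > t := by omega
  simp [h0] at hlen
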